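-- pv_equiv track=rewrite | github.com/CHHyuk/CodingTestPrac | Programmers_Quiz/프로그래머스 고득점/완전탐색/1-2.py | solution
-- ===== SOURCE A (Python) =====
-- def solution(answers):
--     count = [0,0,0]
--     first = [1,2,3,4,5] * 10000
--     second = [2,1,2,3,2,4,2,5] * 10000
--     third = [3,3,1,1,2,2,4,4,5,5] * 10000
--
--     for i in range(len(answers)):
--         if answers[i] == first[i]:
--             count[0] += 1
--         if answers[i] == second[i]:
--             count[1] += 1
--         if answers[i] == third[i]:
--             count[2] += 1
--
--     rank = []
--     for j in range(len(count)):
--         if max(count) == count[j]: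
--             rank.append(j+1)
--
--     return rank
-- ===== SOURCE B (Python) =====
-- def solution(answers):
--     # One pass over answers builds a histogram keyed by (position mod 40, answer)
--     # (40 = lcm of the three pattern lengths 5, 8, 10); each supervisor's score
--     # is then read off the 40-bucket histogram without rescanning answers.
--     keys = [(i % 40, a) for i, a in enumerate(answers)]
--     hist = {}
--     for k in keys:
--         hist[k] = hist.get(k, 0) + 1
--     patterns = [[1, 2, 3, 4, 5], [2, 1, 2, 3, 2, 4, 2, 5], [3, 3, 1, 1, 2, 2, 4, 4, 5, 5]]
--     scores = [sum(hist.get((r, p[r % len(p)]), 0) for r in range(40)) for p in patterns]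
--     best = max(scores)
--     return [j + 1 for j, s in enumerate(scores) if s == best]
-- ===== Notes on version B (the rewrite author's own statement) =====
-- stated objective: alternative
-- what changed: B replaces A's interleaved per-index comparison loop (over three materialized 50000/80000/100000-element repeated lists) with a residue histogram: one pass counts occurrences of each (index mod 40, answer) pair in a dict, and each supervisor's score is then summed from the 40 residue buckets, so answers is never rescanned per pattern and no repeated lists are built.
import Mathlib
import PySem

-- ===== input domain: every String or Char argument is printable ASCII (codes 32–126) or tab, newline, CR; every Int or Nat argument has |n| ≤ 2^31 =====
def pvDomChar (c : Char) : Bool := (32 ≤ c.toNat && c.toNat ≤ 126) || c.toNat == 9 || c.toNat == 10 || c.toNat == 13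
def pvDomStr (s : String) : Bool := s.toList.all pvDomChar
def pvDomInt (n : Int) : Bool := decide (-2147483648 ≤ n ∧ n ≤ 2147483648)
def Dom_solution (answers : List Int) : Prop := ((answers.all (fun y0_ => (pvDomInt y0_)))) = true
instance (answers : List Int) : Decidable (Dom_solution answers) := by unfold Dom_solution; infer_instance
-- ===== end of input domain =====

-- B replaces A's interleaved comparison loop over three materialized repeated lists with a
-- residue histogram: one pass counts (index mod 40, answer) pairs in a dict (40 = lcm of the
-- pattern lengths), and each supervisor's score is summed from the 40 buckets; objective: alternative.

-- ===== PORT A =====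
-- A's loop body: the three `if answers[i] == …[i]: count[j] += 1` statements
def pvStepA (answers first second third : List Int) (c : List Int) (i : Int) : List Int :=
  let c := if PySem.List.pyGetD answers i 0 = PySem.List.pyGetD first i 0 then
             PySem.List.pySetD c 0 (PySem.List.pyGetD c 0 0 + 1) else c
  let c := if PySem.List.pyGetD answers i 0 = PySem.List.pyGetD second i 0 then
             PySem.List.pySetD c 1 (PySem.List.pyGetD c 1 0 + 1) else c
  let c := if PySem.List.pyGetD answers i 0 = PySem.List.pyGetD third i 0 then
             PySem.List.pySetD c 2 (PySem.List.pyGetD c 2 0 + 1) else c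
  c

def solution (answers : List Int) : List Int :=
  let first : List Int := PySem.List.pyRepeat [1,2,3,4,5] 10000
  let second : List Int := PySem.List.pyRepeat [2,1,2,3,2,4,2,5] 10000
  let third : List Int := PySem.List.pyRepeat [3,3,1,1,2,2,4,4,5,5] 10000
  let count : List Int :=
    (PySem.List.pyRange 0 (PySem.List.len answers)).foldl
      (pvStepA answers first second third) [0,0,0]
  (PySem.List.pyRange 0 (PySem.List.len count)).foldl (fun rank j =>
    if (PySem.List.max? count (fun x => x)).getD 0 = PySem.List.pyGetD count j 0 then
      rank ++ [j + 1] else rank) []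

-- ===== PORT B =====
-- keys = [(i % 40, a) for i, a in enumerate(answers)]
def pvKeys (answers : List Int) : List (Int × Int) :=
  (PySem.List.enumerate answers).map (fun p => (PySem.Int.mod p.1 40, p.2))

-- hist = {}; for k in keys: hist[k] = hist.get(k, 0) + 1
def pvHist (answers : List Int) : PySem.Dict (Int × Int) Int :=
  (pvKeys answers).foldl (fun d k => d.insert k (d.getD k 0 + 1)) PySem.Dict.empty

-- the key expression (r, p[r % len(p)]) : second component
def pvF (pat : List Int) (r : Int) : Int :=
  PySem.List.pyGetD pat (PySem.Int.mod r (PySem.List.len pat)) 0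

-- sum(hist.get((r, p[r % len(p)]), 0) for r in range(40))
def pvScoreB (answers pat : List Int) : Int :=
  (PySem.List.pyRange 0 40).foldl (fun s r => s + (pvHist answers).getD (r, pvF pat r) 0) 0

def solution_alt (answers : List Int) : List Int :=
  let patterns : List (List Int) := [[1,2,3,4,5], [2,1,2,3,2,4,2,5], [3,3,1,1,2,2,4,4,5,5]]
  let scores : List Int := patterns.map (fun p => pvScoreB answers p)
  let best : Int := (PySem.List.max? scores (fun x => x)).getD 0
  (PySem.List.enumerate scores).foldl (fun rk q => if q.2 = best then rk ++ [q.1 + 1] else rk) []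

-- ===== PRECONDITION & SPEC =====
-- Pre_ excludes lists longer than 50000, on which A raises IndexError (its repeated
-- pattern lists have only 50000 elements).
def Pre_solution (answers : List Int) : Prop := answers.length ≤ 50000
instance (answers : List Int) : Decidable (Pre_solution answers) := by unfold Pre_solution; infer_instance
def pvWitness_solution : List Int := [1, 3, 2, 4, 2]

def Spec_solution (answers : List Int) (out : List Int) : Prop := out = solution_alt answers
instance (answers : List Int) (out : List Int) : Decidable (Spec_solution answers out) := by unfold Spec_solution; infer_instance

-- ===== CLAIM (what is proved, stated in full; the proofs are below) =====
def Claim_equal_solution : Prop := ∀ (answers : List Int), Dom_solution answers → Pre_solution answers → Spec_solution answers (solution answers)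

-- ===== LEMMAS AND PROOFS =====

-- number of i < n with answers[i] equal to the cyclic pattern value at i
def pvCnt (answers pat : List Int) (n : Nat) : Int :=
  ((List.range n).countP (fun m : Nat =>
    PySem.List.pyGetD answers (m : Int) 0 == pat.getD (m % pat.length) 0) : Int)

theorem rep_getD (pat : List Int) (k m : Nat) (hm : m < pat.length * k) :
    ((List.replicate k pat).flatten).getD m 0 = pat.getD (m % pat.length) 0 := by
  induction k generalizing m with
  | zero => omega
  | succ k ih =>
    rw [List.replicate_succ, List.flatten_cons]
    by_cases h : m < pat.length
    · rw [List.getD_append _ _ _ _ h, Nat.mod_eq_of_lt h]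
    · have hl : pat.length ≤ m := by omega
      rw [List.getD_append_right _ _ _ _ hl]
      rw [Nat.mul_succ] at hm
      have hlt : m - pat.length < pat.length * k := by omega
      rw [ih _ hlt, Nat.mod_eq_sub_mod hl]

theorem pyRepeat_getD (pat : List Int) (m : Nat) (hm : m < pat.length * 10000) :
    PySem.List.pyGetD (PySem.List.pyRepeat pat 10000) (m : Int) 0
      = pat.getD (m % pat.length) 0 := by
  rw [PySem.List.pyGetD_natCast, PySem.List.pyRepeat]
  exact rep_getD pat 10000 m hm

theorem pvCnt_succ (answers pat : List Int) (n : Nat) :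
    pvCnt answers pat (n + 1)
      = pvCnt answers pat n
        + (if PySem.List.pyGetD answers (n : Int) 0 = pat.getD (n % pat.length) 0 then 1 else 0) := by
  simp [pvCnt, List.range_succ, List.countP_append, List.countP_cons]

theorem foldA (answers : List Int) (n : Nat) (hn : n ≤ 50000) (x y z : Int) :
    (PySem.List.pyRange 0 (n : Int)).foldl
      (pvStepA answers (PySem.List.pyRepeat [1,2,3,4,5] 10000)
        (PySem.List.pyRepeat [2,1,2,3,2,4,2,5] 10000)
        (PySem.List.pyRepeat [3,3,1,1,2,2,4,4,5,5] 10000)) [x, y, z]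
    = [x + pvCnt answers [1,2,3,4,5] n,
       y + pvCnt answers [2,1,2,3,2,4,2,5] n,
       z + pvCnt answers [3,3,1,1,2,2,4,4,5,5] n] := by
  induction n generalizing x y z with
  | zero => simp [pvCnt]
  | succ n ih =>
    have h0 : (0:Int) ≤ (n:Int) := by positivity
    have hcast : ((n+1 : Nat) : Int) = (n : Int) + 1 := by push_cast; ring
    rw [hcast, PySem.List.pyRange_one_succ_right h0, List.foldl_append, ih (by omega)]
    simp only [List.foldl_cons, List.foldl_nil]
    rw [pvCnt_succ, pvCnt_succ, pvCnt_succ]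
    unfold pvStepA
    rw [pyRepeat_getD [1,2,3,4,5] n (by simp; omega),
        pyRepeat_getD [2,1,2,3,2,4,2,5] n (by simp; omega),
        pyRepeat_getD [3,3,1,1,2,2,4,4,5,5] n (by simp; omega)]
    split_ifs <;>
      simp [PySem.List.pySetD, PySem.List.pySet?,
            PySem.List.pyGetD, PySem.List.pyGet?, PySem.List.pyIdx?, List.cons.injEq] <;> omega

theorem countA_eq (answers : List Int) (hpre : answers.length ≤ 50000) :
    (PySem.List.pyRange 0 (PySem.List.len answers)).foldl
      (pvStepA answers (PySem.List.pyRepeat [1,2,3,4,5] 10000)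
        (PySem.List.pyRepeat [2,1,2,3,2,4,2,5] 10000)
        (PySem.List.pyRepeat [3,3,1,1,2,2,4,4,5,5] 10000)) [0, 0, 0]
    = [pvCnt answers [1,2,3,4,5] answers.length,
       pvCnt answers [2,1,2,3,2,4,2,5] answers.length,
       pvCnt answers [3,3,1,1,2,2,4,4,5,5] answers.length] := by
  rw [PySem.List.len_eq, foldA answers answers.length hpre 0 0 0]
  simp only [zero_add]

-- summing per-residue counts of (r, pvF pat r) over a Nodup list covering all first
-- components counts exactly the pairs whose second component matches pvF of their first
theorem pv_sum_count (pat : List Int) (ks : List (Int × Int)) (rs : List Int)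
    (hnd : rs.Nodup) (hmem : ∀ k ∈ ks, k.1 ∈ rs) :
    (rs.map (fun r => ((ks.count (r, pvF pat r) : Nat) : Int))).sum
      = ((ks.countP (fun k => k.2 == pvF pat k.1) : Nat) : Int) := by
  induction ks with
  | nil => simp
  | cons k ks ih =>
    have hk1 : k.1 ∈ rs := hmem k (by simp)
    have hrest : ∀ q ∈ ks, q.1 ∈ rs := fun q hq => hmem q (by simp [hq])
    have hsplit : (rs.map (fun r => (((k :: ks).count (r, pvF pat r) : Nat) : Int))).sum
        = (rs.map (fun r => ((ks.count (r, pvF pat r) : Nat) : Int))).sum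
          + (rs.map (fun r => if (r, pvF pat r) == k then (1:Int) else 0)).sum := by
      rw [← PySem.List.sum_map_add_int]
      congr 1
      apply List.map_congr_left
      intro r _
      rw [List.count_cons]
      by_cases h : (r, pvF pat r) = k
      · simp [h]
      · simp [h, Ne.symm h]
    rw [hsplit, ih hrest, PySem.List.sum_map_ite_one_zero, List.countP_cons]
    by_cases h : k.2 = pvF pat k.1
    · have hcnt : rs.countP (fun r => (r, pvF pat r) == k) = 1 := by
        have hcong : ∀ r ∈ rs, ((r, pvF pat r) == k) = true ↔ (r == k.1) = true := by
          intro r _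
          simp only [beq_iff_eq]
          constructor
          · intro hrk
            exact congrArg Prod.fst hrk
          · intro hr
            subst hr
            exact Prod.ext_iff.mpr ⟨rfl, h.symm⟩
        rw [List.countP_congr hcong]
        rw [← List.count_eq_countP]
        exact List.count_eq_one_of_mem hnd hk1
      rw [hcnt]
      simp [h]
    · have hcnt : rs.countP (fun r => (r, pvF pat r) == k) = 0 := by
        rw [List.countP_eq_zero]
        intro r _
        simp only [beq_iff_eq]
        intro hrk
        apply h
        have h1 : r = k.1 := congrArg Prod.fst hrk
        have h2 : pvF pat r = k.2 := congrArg Prod.snd hrk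
        rw [← h2, h1]
      rw [hcnt]
      simp [h]

theorem pvScoreB_eq (answers pat : List Int) (hdvd : pat.length ∣ 40) :
    pvScoreB answers pat = pvCnt answers pat answers.length := by
  unfold pvScoreB
  rw [PySem.List.foldl_add, zero_add]
  have hget : (fun r => (pvHist answers).getD (r, pvF pat r) 0)
      = fun r => (((pvKeys answers).count (r, pvF pat r) : Nat) : Int) := by
    funext r
    rw [pvHist, PySem.Dict.getD_foldl_insert_add_one, PySem.Dict.getD_empty, zero_add]
  rw [hget]
  rw [pv_sum_count pat (pvKeys answers) _ (PySem.List.nodup_pyRange_one 0 40)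
        (by
          intro k hk
          rw [pvKeys] at hk
          rcases List.mem_map.mp hk with ⟨p, _, rfl⟩
          rw [PySem.List.mem_pyRange_one]
          exact ⟨PySem.Int.mod_nonneg _ (by norm_num), PySem.Int.mod_lt _ (by norm_num)⟩)]
  rw [pvKeys, List.countP_map, PySem.List.enumerate_eq_map_pyRange answers 0, List.countP_map,
      PySem.List.len_eq, PySem.List.pyRange_zero_natCast, List.countP_map]
  rw [pvCnt]
  congr 1
  apply List.countP_congr
  intro m _
  simp only [Function.comp]
  have hmod40 : PySem.Int.mod (m : Int) 40 = ((m % 40 : Nat) : Int) := by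
    rw [show (40:Int) = ((40:Nat):Int) from rfl, PySem.Int.mod_natCast]
  have hf : pvF pat (PySem.Int.mod (m : Int) 40) = pat.getD (m % pat.length) 0 := by
    rw [hmod40, pvF, PySem.List.len_eq, PySem.Int.mod_natCast, PySem.List.pyGetD_natCast,
        Nat.mod_mod_of_dvd m hdvd]
  rw [hf]

theorem rank_eq (a b c : Int) :
    (PySem.List.pyRange 0 (PySem.List.len [a, b, c])).foldl (fun rank j =>
      if (PySem.List.max? [a, b, c] (fun x => x)).getD 0 = PySem.List.pyGetD [a, b, c] j 0 then
        rank ++ [j + 1] else rank) []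
    = (PySem.List.enumerate [a, b, c]).foldl (fun r p =>
        if p.2 = (PySem.List.max? [a, b, c] (fun x => x)).getD 0 then r ++ [p.1 + 1] else r) [] := by
  have hl3 : PySem.List.len [a, b, c] = 3 := by simp [PySem.List.len_eq]
  have hr : PySem.List.pyRange 0 3 = [0, 1, 2] := by decide
  have he : PySem.List.enumerate [a, b, c] = [(0, a), (1, b), (2, c)] := by
    simp [PySem.List.enumerate_cons, PySem.List.enumerate_nil]
  rw [hl3, hr, he]
  simp only [List.foldl_cons, List.foldl_nil,
    PySem.List.pyGetD_zero_cons, PySem.List.max?_id_cons, Option.getD_some]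
  have h1 : PySem.List.pyGetD [a, b, c] 1 0 = b := by
    simp [PySem.List.pyGetD, PySem.List.pyGet?, PySem.List.pyIdx?]
  have h2 : PySem.List.pyGetD [a, b, c] 2 0 = c := by
    simp [PySem.List.pyGetD, PySem.List.pyGet?, PySem.List.pyIdx?]
  rw [h1, h2]
  simp only [eq_comm]

-- ===== VERDICT (by name: the statement is the Claim_ definition above) =====
theorem solution_spec : Claim_equal_solution := by
  intro answers _ hpre
  unfold Spec_solution solution solution_alt
  simp only [List.map_cons, List.map_nil]
  rw [countA_eq answers hpre]
  simp only [pvScoreB_eq answers [1,2,3,4,5] (by norm_num),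
      pvScoreB_eq answers [2,1,2,3,2,4,2,5] (by norm_num),
      pvScoreB_eq answers [3,3,1,1,2,2,4,4,5,5] (by norm_num)]
  exact rank_eq _ _ _
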